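-- pv_equiv track=rewrite | github.com/yasabh/elte-comsec | w5-encryption-by-changing-key/main.py | do_chunk
-- ===== SOURCE A (Python) =====
-- def do_chunk(string, length):
--     chunk = []
--     for iKey in range(0, length):
--         group = []
--         for i in range(0, len(string)):
--             if (i % length == iKey):
--                 group.append(string[i])
--         chunk.append(group)
--     return chunk
-- ===== SOURCE B (Python) =====
-- def do_chunk(string, length):
--     if length <= 0:
--         return []
--     chunk = [[] for _ in range(length)]
--     for i, ch in enumerate(string):
--         chunk[i % length].append(ch)
--     return chunk
-- ===== Notes on version B (the rewrite author's own statement) =====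
-- stated objective: faster
-- what changed: Replaces A's nested loops (one full scan of the string per bucket) by preallocated buckets filled in a single enumerate pass that appends each character to bucket i % length.
import Mathlib
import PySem

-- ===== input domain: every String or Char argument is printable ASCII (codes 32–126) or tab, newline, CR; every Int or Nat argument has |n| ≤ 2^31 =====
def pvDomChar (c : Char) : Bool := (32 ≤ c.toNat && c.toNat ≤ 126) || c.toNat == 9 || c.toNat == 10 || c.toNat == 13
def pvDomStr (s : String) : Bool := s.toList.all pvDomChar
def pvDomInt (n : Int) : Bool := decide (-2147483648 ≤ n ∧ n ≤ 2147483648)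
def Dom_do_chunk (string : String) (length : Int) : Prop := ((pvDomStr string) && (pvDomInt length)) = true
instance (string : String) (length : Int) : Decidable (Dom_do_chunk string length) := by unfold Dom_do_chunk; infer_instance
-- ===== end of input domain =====

-- B replaces A's nested loops (one full scan of the string per bucket) by preallocated
-- buckets filled in a single enumerate pass appending each character to bucket i % length.

-- ===== PORT A =====
def do_chunk (string : String) (length : Int) : List (List String) :=
  (PySem.List.pyRange 0 length).foldl
    (fun chunk iKey =>
      chunk ++ [(PySem.List.pyRange 0 (PySem.Str.len string)).foldl
        (fun group i =>
          if PySem.Int.mod i length = iKey then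
            -- string[i] is a 1-character string; i is always in range here
            group ++ [String.mk [PySem.List.pyGetD string.toList i ' ']]
          else group) []])
    []

-- ===== PORT B =====
def do_chunk_alt (string : String) (length : Int) : List (List String) :=
  if length ≤ 0 then []
  else
    (PySem.List.enumerate (string.toList.map (fun c => String.mk [c]))).foldl
      (fun chunk p =>
        -- chunk[i % length].append(ch): read the bucket, extend it, write it back
        chunk.set (PySem.Int.mod p.1 length).toNat
          (chunk.getD (PySem.Int.mod p.1 length).toNat [] ++ [p.2]))
      (List.replicate length.toNat [])

-- ===== PRECONDITION & SPEC =====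
def Spec_do_chunk (string : String) (length : Int) (out : List (List String)) : Prop := out = do_chunk_alt string length
instance (string : String) (length : Int) (out : List (List String)) : Decidable (Spec_do_chunk string length out) := by unfold Spec_do_chunk; infer_instance

-- ===== CLAIM (what is proved, stated in full; the proofs are below) =====
def Claim_equal_do_chunk : Prop := ∀ (string : String) (length : Int), Dom_do_chunk string length → Spec_do_chunk string length (do_chunk string length)

-- ===== LEMMAS AND PROOFS =====

-- A, normalized: bucket k holds the characters whose index is ≡ k (mod length)
theorem do_chunk_eq_spec (string : String) (length : Int) (hL : 0 < length) :
    do_chunk string length =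
    (List.range length.toNat).map (fun k =>
      ((List.range string.toList.length).filter (fun i => decide (i % length.toNat = k))).map
        (fun i => String.mk [string.toList.getD i ' '])) := by
  unfold do_chunk
  rw [show length = ((length.toNat : Nat) : Int) by omega]
  rw [PySem.List.pyRange_zero_natCast, List.foldl_map, PySem.Str.len_eq,
    PySem.List.pyRange_zero_natCast]
  simp only [List.foldl_map, PySem.Int.mod_natCast, PySem.List.pyGetD_natCast,
    Nat.cast_inj, Int.toNat_natCast]
  rw [PySem.List.foldl_append_singleton_eq_map]
  simp only [List.nil_append]
  apply List.map_congr_left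
  intro k _
  have := PySem.List.foldl_append_if (fun i : Nat => decide (i % length.toNat = k))
    (fun i : Nat => String.mk [string.toList.getD i ' ']) (List.range string.toList.length) []
  simp only [decide_eq_true_eq, List.nil_append] at this
  exact this

-- B's distribution loop, characterized bucket-wise (induction on the characters)
theorem bfold_nat_spec (N : Nat) (hN : 0 < N) (s : List String) :
    ∀ (a : Nat) (chunk : List (List String)), chunk.length = N →
    (PySem.List.enumerate s (a : Int)).foldl
      (fun chunk p =>
        chunk.set (PySem.Int.mod p.1 (N : Int)).toNat
          (chunk.getD (PySem.Int.mod p.1 (N : Int)).toNat [] ++ [p.2])) chunk =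
    (List.range N).map (fun k =>
      chunk.getD k [] ++
      ((List.range s.length).filter (fun j => decide ((a + j) % N = k))).map
        (fun j => s.getD j "")) := by
  induction s with
  | nil =>
    intro a chunk hc
    simp only [PySem.List.enumerate_nil, List.foldl_nil, List.length_nil, List.range_zero,
      List.filter_nil, List.map_nil, List.append_nil]
    refine List.ext_getElem (by simp [hc]) ?_
    intro k h1 h2
    simp only [List.length_map, List.length_range] at h2
    rw [List.getElem_map, List.getElem_range, List.getD_eq_getElem?_getD,
      List.getElem?_eq_getElem (by omega : k < chunk.length)]
    rfl
  | cons x rest ih =>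
    intro a chunk hc
    rw [PySem.List.enumerate_cons, List.foldl_cons,
      show ((a : Int) + 1) = ((a + 1 : Nat) : Int) by push_cast; ring]
    rw [ih (a + 1) _ (by simp [hc])]
    apply List.map_congr_left
    intro k hk
    rw [List.mem_range] at hk
    have hmod : (PySem.Int.mod (a : Int) (N : Int)).toNat = a % N := by
      rw [PySem.Int.mod_natCast, Int.toNat_natCast]
    have haN : a % N < N := Nat.mod_lt _ hN
    rw [hmod]
    have hset : (chunk.set (a % N) (chunk.getD (a % N) [] ++ [x])).getD k [] =
        if a % N = k then chunk.getD k [] ++ [x] else chunk.getD k [] := by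
      simp only [List.getD_eq_getElem?_getD, List.getElem?_set, hc, haN, if_true]
      split_ifs with h
      · subst h; simp [hc, haN]
      · rfl
    rw [hset]
    have hrange : List.range (x :: rest).length = 0 :: (List.range rest.length).map Nat.succ := by
      simp [List.range_succ_eq_map]
    rw [hrange, List.filter_cons, List.filter_map]
    have hcond : (fun j => decide ((a + j) % N = k)) ∘ Nat.succ
        = (fun j => decide ((a + 1 + j) % N = k)) := by
      funext j
      have h' : a + j.succ = a + 1 + j := by omega
      simp [Function.comp, h']
    rw [hcond]
    simp only [Nat.add_zero]
    have hgd : ((fun j => (x :: rest).getD j "") ∘ Nat.succ) = (fun j => rest.getD j "") := by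
      funext j; rfl
    rw [apply_ite (List.map (fun j => (x :: rest).getD j ""))]
    simp only [List.map_cons, List.map_map, hgd]
    by_cases h : a % N = k
    · simp [h, List.append_assoc]
    · simp [h]

-- ===== VERDICT (by name: the statement is the Claim_ definition above) =====
theorem do_chunk_spec : Claim_equal_do_chunk := by
  intro string length _
  unfold Spec_do_chunk do_chunk_alt
  by_cases hL : length ≤ 0
  · simp [hL, do_chunk, PySem.List.pyRange_one_eq_nil hL]
  · rw [if_neg hL]
    have hL' : 0 < length := by omega
    rw [do_chunk_eq_spec string length hL']
    rw [show length = ((length.toNat : Nat) : Int) by omega]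
    simp only [Int.toNat_natCast]
    rw [show (0 : Int) = ((0 : Nat) : Int) by simp]
    rw [bfold_nat_spec length.toNat (by omega) _ 0 _ (by simp)]
    apply List.map_congr_left
    intro k hk
    rw [List.mem_range] at hk
    rw [show (List.replicate length.toNat ([] : List String)).getD k [] = [] from by
      rw [List.getD_eq_getElem?_getD, List.getElem?_replicate]; simp [hk]]
    simp only [List.nil_append, Nat.zero_add, List.length_map]
    apply List.map_congr_left
    intro j hj
    rw [List.mem_filter, List.mem_range] at hj
    have hjn : j < string.toList.length := hj.1
    rw [List.getD_eq_getElem?_getD, List.getD_eq_getElem?_getD, List.getElem?_map,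
      List.getElem?_eq_getElem hjn]
    rfl
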